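-- pv_equiv track=rewrite | github.com/helmfile2compose/h2c-core | build-distribution.py | parse_flat_script
-- ===== SOURCE A (Python) =====
-- def parse_flat_script(text: str) -> tuple[dict[str, str], list[str]]:
--     """Parse a flat .py script into deduplicated imports + body lines."""
--     all_imports: dict[str, str] = {}
--     body: list[str] = []
--     past_header = False
--     in_imports = True
--
--     for line in text.splitlines(keepends=True):
--         stripped = line.strip()
--         if not past_header:
--             if (stripped.startswith("#!") or stripped.startswith('"""')
--                     or stripped.startswith("# pylint") or not stripped):
--                 continue
--             past_header = True
--
--         if in_imports:
--             if stripped.startswith(("import ", "from ")):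
--                 key = stripped
--                 if key not in all_imports:
--                     all_imports[key] = line
--                 continue
--             if not stripped:
--                 continue
--             in_imports = False
--
--         body.append(line)
--
--     return all_imports, body
-- ===== SOURCE B (Python) =====
-- def parse_flat_script(text: str) -> tuple[dict[str, str], list[str]]:
--     """Parse a flat .py script into deduplicated imports + body lines.
--
--     Three sequential phases over an index into the line list instead of a
--     flag-driven single loop; the body is the remaining slice, not appended."""
--     lines = text.splitlines(keepends=True)
--     n = len(lines)
--
--     # Phase 1: skip the header (shebang, docstring opener, pylint pragma, blanks).
--     i = 0
--     while i < n:
--         s = lines[i].strip()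
--         if s.startswith("#!") or s.startswith('"""') or s.startswith("# pylint") or not s:
--             i += 1
--         else:
--             break
--
--     # Phase 2: collect deduplicated imports, skipping blanks; stop (without
--     # consuming) at the first non-blank, non-import line.
--     all_imports: dict[str, str] = {}
--     while i < n:
--         s = lines[i].strip()
--         if s.startswith(("import ", "from ")):
--             if s not in all_imports:
--                 all_imports[s] = lines[i]
--         elif s:
--             break
--         i += 1
--
--     # Phase 3: everything left is the body.
--     return all_imports, lines[i:]
-- ===== Notes on version B (the rewrite author's own statement) =====
-- stated objective: simpler
-- what changed: Replaces the flag-driven single loop (past_header/in_imports booleans, body built by append) with three explicit sequential phases over an index into the line list: skip header, collect imports, and return the remaining slice as the body.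
import Mathlib
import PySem

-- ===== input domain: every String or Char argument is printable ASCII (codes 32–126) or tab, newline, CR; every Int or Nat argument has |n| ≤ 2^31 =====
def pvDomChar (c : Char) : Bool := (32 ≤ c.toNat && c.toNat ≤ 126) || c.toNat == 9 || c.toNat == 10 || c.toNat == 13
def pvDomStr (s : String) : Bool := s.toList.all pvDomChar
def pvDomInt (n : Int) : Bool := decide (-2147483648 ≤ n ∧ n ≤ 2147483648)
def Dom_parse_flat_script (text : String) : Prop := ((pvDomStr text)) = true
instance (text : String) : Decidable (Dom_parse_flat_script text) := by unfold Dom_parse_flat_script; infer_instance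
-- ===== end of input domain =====

-- B replaces A's flag-driven single loop with three sequential phases (skip header,
-- collect imports, remaining slice = body); objective: simpler decomposition, same cost.

-- ===== PORT A =====
-- text.splitlines(keepends=True), hand-ported: exact on Dom (only '\n', '\r', '\r\n'
-- line breaks can occur there). Shared by both ports (both Pythons call it).
def pvSplitKeep (cur : List Char) : List Char → List String
  | [] => if cur.isEmpty then [] else [String.mk cur.reverse]
  | '\r' :: '\n' :: rest => String.mk (cur.reverse ++ ['\r', '\n']) :: pvSplitKeep [] rest
  | '\r' :: rest => String.mk (cur.reverse ++ ['\r']) :: pvSplitKeep [] rest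
  | '\n' :: rest => String.mk (cur.reverse ++ ['\n']) :: pvSplitKeep [] rest
  | c :: rest => pvSplitKeep (c :: cur) rest

-- A's single loop over the lines, state = (all_imports, body, past_header, in_imports)
def pvLoopA : List String → PySem.Dict String String → List String → Bool → Bool →
    PySem.Dict String String × List String
  | [], d, b, _, _ => (d, b)
  | line :: rest, d, b, past, imp =>
    let s := PySem.Str.strip line
    if !past && (PySem.Str.startswith s "#!" || PySem.Str.startswith s "\"\"\"" ||
        PySem.Str.startswith s "# pylint" || s == "") then
      pvLoopA rest d b past imp            -- continue (still in header)
    else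
      if imp then
        if PySem.Str.startswith s "import " || PySem.Str.startswith s "from " then
          pvLoopA rest (if d.contains s then d else d.insert s line) b true imp
        else if s == "" then
          pvLoopA rest d b true imp
        else
          pvLoopA rest d (b ++ [line]) true false   -- in_imports = False; body.append
      else
        pvLoopA rest d (b ++ [line]) true imp

def parse_flat_script (text : String) : (List (String × String)) × List String :=
  let r := pvLoopA (pvSplitKeep [] text.toList) PySem.Dict.empty [] false true
  (r.1.items, r.2)

-- ===== PORT B =====
def pvHdr (line : String) : Bool :=
  let s := PySem.Str.strip line
  PySem.Str.startswith s "#!" || PySem.Str.startswith s "\"\"\"" ||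
    PySem.Str.startswith s "# pylint" || s == ""

-- Phase 1: skip the header lines.
def pvPhase1 : List String → List String
  | [] => []
  | l :: ls => if pvHdr l then pvPhase1 ls else l :: ls

-- Phase 2: collect deduplicated imports, skip blanks; stop (without consuming)
-- at the first non-blank non-import line; returns (imports, remaining lines).
def pvPhase2 : PySem.Dict String String → List String →
    PySem.Dict String String × List String
  | d, [] => (d, [])
  | d, l :: ls =>
    let s := PySem.Str.strip l
    if PySem.Str.startswith s "import " || PySem.Str.startswith s "from " then
      pvPhase2 (if d.contains s then d else d.insert s l) ls
    else if s == "" then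
      pvPhase2 d ls
    else
      (d, l :: ls)

def parse_flat_script_alt (text : String) : (List (String × String)) × List String :=
  let r := pvPhase2 PySem.Dict.empty (pvPhase1 (pvSplitKeep [] text.toList))
  (r.1.items, r.2)

-- ===== PRECONDITION & SPEC =====
def Spec_parse_flat_script (text : String) (out : (List (String × String)) × List String) : Prop := out = parse_flat_script_alt text
instance (text : String) (out : (List (String × String)) × List String) : Decidable (Spec_parse_flat_script text out) := by unfold Spec_parse_flat_script; infer_instance

-- ===== CLAIM (what is proved, stated in full; the proofs are below) =====
def Claim_equal_parse_flat_script : Prop := ∀ (text : String), Dom_parse_flat_script text → Spec_parse_flat_script text (parse_flat_script text)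

-- ===== LEMMAS AND PROOFS =====

-- once in_imports is False, A just appends every remaining line to body
theorem pvLoopA_body (ls : List String) : ∀ (d : PySem.Dict String String) (b : List String),
    pvLoopA ls d b true false = (d, b ++ ls) := by
  induction ls with
  | nil => intro d b; simp [pvLoopA]
  | cons l ls ih => intro d b; simp [pvLoopA, ih]

-- with past_header = True and in_imports = True, A's loop is B's phase 2
theorem pvLoopA_imports (ls : List String) : ∀ (d : PySem.Dict String String) (b : List String),
    pvLoopA ls d b true true = ((pvPhase2 d ls).1, b ++ (pvPhase2 d ls).2) := by
  induction ls with
  | nil => intro d b; simp [pvLoopA, pvPhase2]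
  | cons l ls ih =>
    intro d b
    simp only [pvLoopA, pvPhase2, Bool.not_true, Bool.false_and, if_false, if_true,
      Bool.false_eq_true]
    split
    · exact ih _ b
    · split
      · exact ih d b
      · simp [pvLoopA_body]

-- the header-skipping part of A's loop is B's phase 1
theorem pvLoopA_header (ls : List String) : ∀ (d : PySem.Dict String String) (b : List String),
    pvLoopA ls d b false true = pvLoopA (pvPhase1 ls) d b true true := by
  induction ls with
  | nil => intro d b; simp [pvPhase1, pvLoopA]
  | cons l ls ih =>
    intro d b
    by_cases h : pvHdr l = true
    · have h' := h
      unfold pvHdr at h'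
      simp only [pvPhase1, h, if_true]
      rw [← ih d b]
      simp only [pvLoopA, Bool.not_false, Bool.true_and]
      rw [h']
      simp
    · have h' : pvHdr l = false := by simpa using h
      unfold pvHdr at h'
      simp only [pvPhase1, h, if_false, Bool.false_eq_true]
      simp only [pvLoopA, Bool.not_false, Bool.true_and, Bool.not_true, Bool.false_and]
      rw [h']
      simp

-- ===== VERDICT (by name: the statement is the Claim_ definition above) =====
theorem parse_flat_script_spec : Claim_equal_parse_flat_script := by
  unfold Claim_equal_parse_flat_script
  intro text _
  unfold Spec_parse_flat_script parse_flat_script parse_flat_script_alt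
  rw [pvLoopA_header, pvLoopA_imports]
  simp
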